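-- pv_equiv track=rewrite | github.com/TonanSalas/improving-interview-code | quote_engine.py | legacy_calculate
-- ===== SOURCE A (Python) =====
-- def legacy_calculate(data):
--     """Old calculation method - no longer used."""
--     total = 0
--     for item in data:
--         if item.get("type") == "liability":
--             total += 500
--         elif item.get("type") == "collision":
--             total += 300
--     return total
-- ===== SOURCE B (Python) =====
-- def legacy_calculate(data):
--     """Old calculation method - no longer used."""
--     types = [item.get("type") for item in data]
--     return types.count("liability") * 500 + types.count("collision") * 300
-- ===== Notes on version B (the rewrite author's own statement) =====
-- stated objective: simpler
-- what changed: Replaces the running-total branching loop with a one-pass extraction of each item's type followed by a closed-form combination of list.count tallies.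
import Mathlib
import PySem

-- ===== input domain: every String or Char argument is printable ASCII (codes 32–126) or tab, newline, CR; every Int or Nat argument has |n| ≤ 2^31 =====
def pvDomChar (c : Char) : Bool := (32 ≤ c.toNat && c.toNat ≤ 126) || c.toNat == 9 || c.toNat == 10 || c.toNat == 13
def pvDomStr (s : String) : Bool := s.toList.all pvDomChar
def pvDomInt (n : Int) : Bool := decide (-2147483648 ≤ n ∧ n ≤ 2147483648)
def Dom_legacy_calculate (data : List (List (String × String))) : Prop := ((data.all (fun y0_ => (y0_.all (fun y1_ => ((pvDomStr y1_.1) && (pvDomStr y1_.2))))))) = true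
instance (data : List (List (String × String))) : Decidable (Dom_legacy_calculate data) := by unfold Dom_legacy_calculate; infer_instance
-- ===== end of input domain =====

-- B: one-pass type extraction + closed-form combination of count tallies, instead of a branching running-total loop (simpler decomposition).


-- ===== PORT A =====
def legacy_calculate (data : List (List (String × String))) : Int :=
  data.foldl (fun total item =>
    if (PySem.Dict.mk item).get? "type" = some "liability" then total + 500
    else if (PySem.Dict.mk item).get? "type" = some "collision" then total + 300
    else total) 0

-- ===== PORT B =====
def legacy_calculate_alt (data : List (List (String × String))) : Int :=
  let types := data.map (fun item => (PySem.Dict.mk item).get? "type")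
  PySem.List.count types (some "liability") * 500 + PySem.List.count types (some "collision") * 300

-- ===== PRECONDITION & SPEC =====
def Spec_legacy_calculate (data : List (List (String × String))) (out : Int) : Prop := out = legacy_calculate_alt data
instance (data : List (List (String × String))) (out : Int) : Decidable (Spec_legacy_calculate data out) := by unfold Spec_legacy_calculate; infer_instance

-- ===== CLAIM (what is proved, stated in full; the proofs are below) =====
def Claim_equal_legacy_calculate : Prop := ∀ (data : List (List (String × String))), Dom_legacy_calculate data → Spec_legacy_calculate data (legacy_calculate data)

-- ===== LEMMAS AND PROOFS =====

-- ===== VERDICT (by name: the statement is the Claim_ definition above) =====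
lemma legacy_calculate_foldl_shift (data : List (List (String × String))) (acc : Int) :
    data.foldl (fun total item =>
      if (PySem.Dict.mk item).get? "type" = some "liability" then total + 500
      else if (PySem.Dict.mk item).get? "type" = some "collision" then total + 300
      else total) acc = acc + legacy_calculate_alt data := by
  induction data generalizing acc with
  | nil => simp [legacy_calculate_alt, PySem.List.count]
  | cons item rest ih =>
    simp only [List.foldl_cons, ih]
    simp only [legacy_calculate_alt, List.map_cons, PySem.List.count, List.count_cons]
    rcases (PySem.Dict.mk item).get? "type" with _ | t
    · simp
    · by_cases h1 : t = "liability"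
      · subst h1; simp; ring
      · by_cases h2 : t = "collision"
        · subst h2; simp; ring
        · simp [h1, h2]

theorem legacy_calculate_spec : Claim_equal_legacy_calculate := by
  intro data _
  unfold Spec_legacy_calculate legacy_calculate
  rw [legacy_calculate_foldl_shift]
  ring
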